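-- pv_equiv track=rewrite | github.com/Alex-M-Yordanov/ScraperProject | Python/app.py | parse
-- ===== SOURCE A (Python) =====
-- def parse(output):
--      lines = output.splitlines()
--      products = []
--
--      for i in range(0, len(lines), 3):
--         if i + 2 < len(lines):
--             name = lines[i].strip()
--             price = lines[i + 1].strip()
--             link = lines[i + 2].strip()
--             product = {"name": name, "price": price, "link": link}
--             products.append(product)
--
--      return products
-- ===== SOURCE B (Python) =====
-- def parse(output):
--     # Stage 1: strip every line up front.
--     stripped = [line.strip() for line in output.splitlines()]
--     # Stage 2: cut off the incomplete trailing group by modular arithmetic.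
--     del stripped[len(stripped) - len(stripped) % 3:]
--     # Stage 3: consume from the END, popping link/price/name, building the
--     # result back-to-front, then reverse once.
--     products = []
--     while stripped:
--         link = stripped.pop()
--         price = stripped.pop()
--         name = stripped.pop()
--         products.append({"name": name, "price": price, "link": link})
--     products.reverse()
--     return products
-- ===== Notes on version B (the rewrite author's own statement) =====
-- stated objective: alternative
-- what changed: Instead of a guarded forward index loop doing strip inline, B works in three staged passes: strip all lines first, truncate to a multiple of three by modular arithmetic (replacing the i+2<len guard), then destructively pop link/price/name off the END of the list building the result back-to-front and reversing once.
import Mathlib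
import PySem

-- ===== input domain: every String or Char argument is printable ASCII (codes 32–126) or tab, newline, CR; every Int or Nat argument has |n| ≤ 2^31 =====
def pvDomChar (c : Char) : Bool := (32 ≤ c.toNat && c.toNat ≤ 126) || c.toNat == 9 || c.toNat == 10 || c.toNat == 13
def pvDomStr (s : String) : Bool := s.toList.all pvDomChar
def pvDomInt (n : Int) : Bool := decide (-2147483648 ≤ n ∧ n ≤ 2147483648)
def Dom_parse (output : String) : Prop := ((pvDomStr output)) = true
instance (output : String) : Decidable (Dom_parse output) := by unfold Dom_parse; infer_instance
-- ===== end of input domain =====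

-- B restructures A's guarded forward index loop into three staged passes:
-- strip all lines, truncate to a multiple of three, then pop link/price/name
-- off the END building the result back-to-front and reversing once.
-- (B mutates only its own local list; same return value.)

-- ===== PORT A =====
def parse (output : String) : List (List (String × String)) :=
  let lines := PySem.Str.splitlines output
  (PySem.List.pyRange 0 (PySem.List.len lines) 3).foldl
    (fun products i =>
      if i + 2 < PySem.List.len lines then
        products ++ [[("name", PySem.Str.strip (PySem.List.pyGetD lines i "")),
                      ("price", PySem.Str.strip (PySem.List.pyGetD lines (i + 1) "")),
                      ("link", PySem.Str.strip (PySem.List.pyGetD lines (i + 2) ""))]]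
      else products) []

-- ===== PORT B =====
-- the while loop: stripped.pop() takes the LAST element, so popping thrice is
-- consuming the head of the reversed list in order link, price, name; the
-- catch-all arm is the 'while stripped:' exit (truncation makes |list| % 3 = 0,
-- so the 1- and 2-element cases are unreachable).
def popLoop : List String → List (List (String × String))
  | link :: price :: name :: rest =>
      [("name", name), ("price", price), ("link", link)] :: popLoop rest
  | _ => []

def parse_alt (output : String) : List (List (String × String)) :=
  let stripped := (PySem.Str.splitlines output).map PySem.Str.strip
  let trunc := stripped.take (stripped.length - stripped.length % 3)
  (popLoop trunc.reverse).reverse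

-- ===== PRECONDITION & SPEC =====
def Spec_parse (output : String) (out : List (List (String × String))) : Prop := out = parse_alt output
instance (output : String) (out : List (List (String × String))) : Decidable (Spec_parse output out) := by unfold Spec_parse; infer_instance

-- ===== CLAIM (what is proved, stated in full; the proofs are below) =====
def Claim_equal_parse : Prop := ∀ (output : String), Dom_parse output → Spec_parse output (parse output)

-- ===== LEMMAS AND PROOFS =====

-- forward-triples characterisation, the bridge both ports are reduced to
def chunks : List String → List (List (String × String))
  | n :: p :: l :: rest =>
      [("name", PySem.Str.strip n), ("price", PySem.Str.strip p),
       ("link", PySem.Str.strip l)] :: chunks rest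
  | _ => []

lemma pyRange3_eq_nil (a b : Int) (h : b ≤ a) : PySem.List.pyRange a b 3 = [] := by
  rw [PySem.List.pyRange_of_pos _ _ (by norm_num)]
  simp [show ¬ a < b by omega]

lemma pyRange3_cons (a b : Int) (h : a < b) :
    PySem.List.pyRange a b 3 = a :: PySem.List.pyRange (a + 3) b 3 := by
  rw [PySem.List.pyRange_of_pos _ _ (by norm_num : (0:Int) < 3),
      PySem.List.pyRange_of_pos _ _ (by norm_num : (0:Int) < 3)]
  have hn : ((b - a + 3 - 1) / 3).toNat
      = (if a + 3 < b then ((b - (a + 3) + 3 - 1) / 3).toNat else 0) + 1 := by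
    split_ifs with h2 <;> omega
  rw [if_pos h, hn, List.range_succ_eq_map]
  simp only [List.map_cons, List.map_map]
  refine congrArg₂ _ (by ring) ?_
  apply List.map_congr_left
  intro k _
  simp [Function.comp]
  ring

lemma chunks_short (xs : List String) (h : xs.length ≤ 2) : chunks xs = [] := by
  match xs with
  | [] => rfl
  | [_] => rfl
  | [_, _] => rfl
  | _ :: _ :: _ :: _ => simp at h

theorem parse_loop (ls : List String) (k : Nat) (acc : List (List (String × String))) :
    (PySem.List.pyRange (k : Int) (ls.length : Int) 3).foldl
      (fun products i =>
        if i + 2 < ((ls.length : Int)) then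
          products ++ [[("name", PySem.Str.strip (PySem.List.pyGetD ls i "")),
                        ("price", PySem.Str.strip (PySem.List.pyGetD ls (i + 1) "")),
                        ("link", PySem.Str.strip (PySem.List.pyGetD ls (i + 2) ""))]]
        else products) acc
    = acc ++ chunks (ls.drop k) := by
  by_cases hk : k < ls.length
  · rw [pyRange3_cons _ _ (by exact_mod_cast hk), List.foldl_cons]
    by_cases h2 : k + 2 < ls.length
    · have hc : ((k : Int) + 2 < (ls.length : Int)) := by exact_mod_cast h2
      rw [if_pos hc]
      have hcast : ((k : Int) + 3) = ((k + 3 : Nat) : Int) := by push_cast; ring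
      rw [hcast, parse_loop ls (k + 3)]
      have h0 : k < ls.length := by omega
      have h1 : k + 1 < ls.length := by omega
      rw [List.drop_eq_getElem_cons h0, List.drop_eq_getElem_cons h1,
          List.drop_eq_getElem_cons h2]
      show _ = acc ++ ([("name", _), ("price", _), ("link", _)] :: chunks (ls.drop (k + 3)))
      have e0 : PySem.List.pyGetD ls (k : Int) "" = ls[k] := by
        rw [PySem.List.pyGetD_natCast]; exact List.getD_eq_getElem ls "" h0
      have e1 : PySem.List.pyGetD ls ((k : Int) + 1) "" = ls[k + 1] := by
        rw [show ((k : Int) + 1) = ((k + 1 : Nat) : Int) by push_cast; ring,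
            PySem.List.pyGetD_natCast]
        exact List.getD_eq_getElem ls "" h1
      have e2 : PySem.List.pyGetD ls ((k : Int) + 2) "" = ls[k + 2] := by
        rw [show ((k : Int) + 2) = ((k + 2 : Nat) : Int) by push_cast; ring,
            PySem.List.pyGetD_natCast]
        exact List.getD_eq_getElem ls "" h2
      rw [e0, e1, e2]
      simp
    · have hc : ¬ ((k : Int) + 2 < (ls.length : Int)) := by
        intro hlt; exact h2 (by exact_mod_cast hlt)
      rw [if_neg hc]
      have hcast : ((k : Int) + 3) = ((k + 3 : Nat) : Int) := by push_cast; ring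
      rw [hcast, parse_loop ls (k + 3)]
      rw [List.drop_eq_nil_of_le (by omega : ls.length ≤ k + 3)]
      rw [chunks_short (ls.drop k) (by simp; omega)]
      rfl
  · rw [pyRange3_eq_nil _ _ (by exact_mod_cast Nat.le_of_not_lt hk)]
    rw [List.drop_eq_nil_of_le (Nat.le_of_not_lt hk)]
    simp [chunks]
termination_by ls.length - k
decreasing_by all_goals omega

lemma popLoop_append (xs ys : List String) (h : xs.length % 3 = 0) :
    popLoop (xs ++ ys) = popLoop xs ++ popLoop ys := by
  match xs with
  | [] => simp [popLoop]
  | [_] => simp at h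
  | [_, _] => simp at h
  | a :: b :: c :: rest =>
      have hr : rest.length % 3 = 0 := by simp at h; omega
      simp only [List.cons_append, popLoop, popLoop_append rest ys hr]

-- B reduced to the same bridge
lemma alt_eq_chunks (ls : List String) :
    (popLoop (((ls.map PySem.Str.strip).take
        ((ls.map PySem.Str.strip).length - (ls.map PySem.Str.strip).length % 3)).reverse)).reverse
    = chunks ls := by
  match ls with
  | [] => rfl
  | [_] => rfl
  | [_, _] => rfl
  | a :: b :: c :: rest =>
      simp only [List.map_cons, List.length_cons]
      have hmod : (rest.map PySem.Str.strip).length.succ.succ.succ -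
          (rest.map PySem.Str.strip).length.succ.succ.succ % 3
          = 3 + ((rest.map PySem.Str.strip).length -
                 (rest.map PySem.Str.strip).length % 3) := by omega
      rw [hmod]
      have htake : (PySem.Str.strip a :: PySem.Str.strip b :: PySem.Str.strip c ::
            rest.map PySem.Str.strip).take
            (3 + ((rest.map PySem.Str.strip).length - (rest.map PySem.Str.strip).length % 3))
          = PySem.Str.strip a :: PySem.Str.strip b :: PySem.Str.strip c ::
            (rest.map PySem.Str.strip).take
              ((rest.map PySem.Str.strip).length - (rest.map PySem.Str.strip).length % 3) := by
        rw [show (3 + ((rest.map PySem.Str.strip).length - (rest.map PySem.Str.strip).length % 3))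
            = (((rest.map PySem.Str.strip).length - (rest.map PySem.Str.strip).length % 3)
               + 1 + 1 + 1) by omega]
        simp [List.take_succ_cons]
      rw [htake]
      have hlen : ((rest.map PySem.Str.strip).take
            ((rest.map PySem.Str.strip).length - (rest.map PySem.Str.strip).length % 3)).reverse.length
            % 3 = 0 := by
        simp; omega
      rw [show (PySem.Str.strip a :: PySem.Str.strip b :: PySem.Str.strip c ::
            (rest.map PySem.Str.strip).take
              ((rest.map PySem.Str.strip).length - (rest.map PySem.Str.strip).length % 3)).reverse
          = ((rest.map PySem.Str.strip).take
              ((rest.map PySem.Str.strip).length - (rest.map PySem.Str.strip).length % 3)).reverse ++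
            [PySem.Str.strip c, PySem.Str.strip b, PySem.Str.strip a] by simp]
      rw [popLoop_append _ _ hlen, List.reverse_append]
      rw [show popLoop [PySem.Str.strip c, PySem.Str.strip b, PySem.Str.strip a]
          = [[("name", PySem.Str.strip a), ("price", PySem.Str.strip b),
              ("link", PySem.Str.strip c)]] from rfl]
      rw [alt_eq_chunks rest]
      rfl

-- ===== VERDICT (by name: the statement is the Claim_ definition above) =====
theorem parse_spec : Claim_equal_parse := by
  intro output _
  show parse output = parse_alt output
  have h := parse_loop (PySem.Str.splitlines output) 0 []
  have h2 := alt_eq_chunks (PySem.Str.splitlines output)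
  simp only [List.drop_zero, List.nil_append, Nat.cast_zero] at h
  simp only [parse, parse_alt, PySem.List.len]
  exact h.trans h2.symm
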